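-- pv_equiv track=rewrite | github.com/gil-miranda/mapa-di-buteco | json_to_csv_rio.py | build_fieldnames
-- ===== SOURCE A (Python) =====
-- from typing import Any, Dict, Iterable, List
--
-- def build_fieldnames(items: List[Dict[str, Any]]) -> List[str]:
--   keys = sorted({k for it in items for k in it.keys()})
--   preferred = [
--     "name",
--     "neighborhood_or_region",
--     "address",
--     "address_complement",
--     "phone",
--     "opening_hours",
--     "dish_name",
--     "dish_description",
--     "dish_image_url",
--     "source_url",
--     "listing_page",
--     "lat",
--     "lng",
--   ]
--
--   ordered: List[str] = []
--   for k in preferred: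
--     if k in keys:
--       ordered.append(k)
--   for k in keys:
--     if k not in ordered:
--       ordered.append(k)
--
--   # Campos extras compatíveis com o script v1 (não existem no JSON original)
--   for extra in ("bairro", "link"):
--     if extra not in ordered:
--       ordered.append(extra)
--
--   return ordered
-- ===== SOURCE B (Python) =====
-- from typing import Any, Dict, List
--
-- def build_fieldnames(items: List[Dict[str, Any]]) -> List[str]:
--   preferred = [
--     "name",
--     "neighborhood_or_region",
--     "address",
--     "address_complement",
--     "phone",
--     "opening_hours",
--     "dish_name",
--     "dish_description",
--     "dish_image_url",
--     "source_url",
--     "listing_page",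
--     "lat",
--     "lng",
--   ]
--   priority = {name: i for i, name in enumerate(preferred)}
--   ordered = sorted({k for it in items for k in it.keys()},
--                    key=lambda k: (priority.get(k, len(preferred)), k))
--   for extra in ("bairro", "link"):
--     if extra not in ordered:
--       ordered.append(extra)
--   return ordered
-- ===== Notes on version B (the rewrite author's own statement) =====
-- stated objective: faster
-- what changed: The two filter passes (the second of which does an O(n) 'k not in ordered' list scan per key) are replaced by one composite-key sort: an enumerate-built priority dict gives preferred keys their ranks and all other keys the max rank with the key itself as tie-break, so a single sorted() call produces the whole order; the extras post-pass is kept.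
import Mathlib
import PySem

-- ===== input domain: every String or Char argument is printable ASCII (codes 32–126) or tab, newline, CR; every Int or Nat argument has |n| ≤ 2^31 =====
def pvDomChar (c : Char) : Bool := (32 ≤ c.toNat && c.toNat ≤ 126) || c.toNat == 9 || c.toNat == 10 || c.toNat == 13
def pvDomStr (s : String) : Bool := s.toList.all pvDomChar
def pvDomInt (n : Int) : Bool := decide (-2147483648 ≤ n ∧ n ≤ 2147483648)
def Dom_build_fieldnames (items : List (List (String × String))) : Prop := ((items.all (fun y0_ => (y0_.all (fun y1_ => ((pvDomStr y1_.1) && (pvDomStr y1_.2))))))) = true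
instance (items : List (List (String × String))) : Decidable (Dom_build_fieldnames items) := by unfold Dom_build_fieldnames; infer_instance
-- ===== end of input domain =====

-- B replaces A's two filter passes by a single sort under the composite key (priority rank, key); objective: simpler.


-- the `preferred` literal both Pythons contain verbatim
def pvPreferred : List String :=
  ["name", "neighborhood_or_region", "address", "address_complement", "phone",
   "opening_hours", "dish_name", "dish_description", "dish_image_url",
   "source_url", "listing_page", "lat", "lng"]

-- ===== PORT A =====
def build_fieldnames (items : List (List (String × String))) : List String :=
  -- keys = sorted({k for it in items for k in it.keys()})
  let keys := PySem.List.sorted (PySem.Set.ofList (items.flatMap (fun it => PySem.Dict.keys ⟨it⟩))) (fun x => x)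
  let preferred := pvPreferred
  -- for k in preferred: if k in keys: ordered.append(k)
  let ordered := preferred.foldl (fun acc k => if k ∈ keys then acc ++ [k] else acc) []
  -- for k in keys: if k not in ordered: ordered.append(k)
  let ordered := keys.foldl (fun acc k => if k ∉ acc then acc ++ [k] else acc) ordered
  -- for extra in ("bairro", "link"): if extra not in ordered: ordered.append(extra)
  (["bairro", "link"]).foldl (fun acc extra => if extra ∉ acc then acc ++ [extra] else acc) ordered

-- ===== PORT B =====
-- priority = {name: i for i, name in enumerate(preferred)}
def pvPriority : PySem.Dict String Int :=
  (PySem.List.enumerate pvPreferred).foldl (fun d p => d.insert p.2 p.1) PySem.Dict.empty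

def build_fieldnames_alt (items : List (List (String × String))) : List String :=
  let preferred := pvPreferred
  let priority := pvPriority
  -- ordered = sorted({k for it in items for k in it.keys()}, key=lambda k: (priority.get(k, len(preferred)), k))
  let ordered := PySem.List.sorted2 (PySem.Set.ofList (items.flatMap (fun it => PySem.Dict.keys ⟨it⟩)))
      (fun k => PySem.Dict.getD priority k (preferred.length : Int)) (fun k => k)
  -- for extra in ("bairro", "link"): if extra not in ordered: ordered.append(extra)
  (["bairro", "link"]).foldl (fun acc extra => if extra ∉ acc then acc ++ [extra] else acc) ordered

-- ===== PRECONDITION & SPEC =====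
def Spec_build_fieldnames (items : List (List (String × String))) (out : List String) : Prop := out = build_fieldnames_alt items
instance (items : List (List (String × String))) (out : List String) : Decidable (Spec_build_fieldnames items out) := by unfold Spec_build_fieldnames; infer_instance

-- ===== CLAIM (what is proved, stated in full; the proofs are below) =====
def Claim_equal_build_fieldnames : Prop := ∀ (items : List (List (String × String))), Dom_build_fieldnames items → Spec_build_fieldnames items (build_fieldnames items)

-- ===== LEMMAS AND PROOFS =====

-- B's composite rank
def pvRank (k : String) : Int := PySem.Dict.getD pvPriority k (pvPreferred.length : Int)

-- a tuple-key sort is the sort under the lexicographic product key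
theorem pv_sorted2_eq_sorted_lex {α : Type} (xs : List α) (k1 : α → Int) (k2 : α → String) :
    PySem.List.sorted2 xs k1 k2 = PySem.List.sorted xs (fun x => toLex (k1 x, k2 x)) := by
  have hbe : (fun (a b : α) => decide (k1 a < k1 b) || (!decide (k1 b < k1 a) && decide (k2 a < k2 b)))
      = (fun a b => decide (toLex (k1 a, k2 a) < toLex (k1 b, k2 b))) := by
    funext a b
    rcases lt_trichotomy (k1 a) (k1 b) with h | h | h
    · simp [h, Prod.Lex.toLex_lt_toLex, not_lt_of_gt h]
    · simp [h, Prod.Lex.toLex_lt_toLex]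
    · simp [h, Prod.Lex.toLex_lt_toLex, not_lt_of_gt h, ne_of_gt h]
  unfold PySem.List.sorted2 PySem.List.sorted
  show List.foldl (fun acc x => PySem.List.insertBy (fun a b => decide (k1 a < k1 b) || (!decide (k1 b < k1 a) && decide (k2 a < k2 b))) x acc) [] xs
     = List.foldl (fun acc x => PySem.List.insertBy (fun a b => decide (toLex (k1 a, k2 a) < toLex (k1 b, k2 b))) x acc) [] xs
  rw [hbe]

-- the 'append if unseen' loop over a duplicate-free list
theorem pv_dedup_fold (l : List String) (acc : List String) (h : l.Nodup) :
    l.foldl (fun a k => if k ∉ a then a ++ [k] else a) acc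
      = acc ++ l.filter (fun k => decide (k ∉ acc)) := by
  induction l generalizing acc with
  | nil => simp
  | cons x t ih =>
    rw [List.nodup_cons] at h
    obtain ⟨hx, ht⟩ := h
    by_cases hmem : x ∈ acc
    · rw [List.foldl_cons, if_neg (by simpa using hmem), ih acc ht, List.filter_cons]
      simp [hmem]
    · have hq : ∀ k ∈ t, (decide (k ∉ acc ++ [x]) : Bool) = decide (k ∉ acc) := by
        intro k hk
        have hne : k ≠ x := fun e => hx (e ▸ hk)
        simp [hne]
      rw [List.foldl_cons, if_pos (by simpa using hmem), ih (acc ++ [x]) ht, List.filter_cons,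
        if_pos (by simpa using hmem), List.filter_congr hq]
      simp

theorem pvRank_lt_of_mem : ∀ a ∈ pvPreferred, pvRank a < 13 := by decide

theorem pvRank_pairwise : pvPreferred.Pairwise (fun a b => pvRank a < pvRank b) := by decide

theorem pvPreferred_nodup : pvPreferred.Nodup := by decide

theorem pvPriority_keys : pvPriority.keys = pvPreferred := by decide

theorem pvRank_of_not_mem {k : String} (h : k ∉ pvPreferred) : pvRank k = 13 := by
  unfold pvRank
  rw [show (pvPreferred.length : Int) = 13 from by decide]
  exact PySem.Dict.getD_of_not_contains _ _
    (by rw [PySem.Dict.contains_eq_decide_mem_keys, pvPriority_keys]; simpa using h)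

-- ===== VERDICT =====
theorem build_fieldnames_spec : Claim_equal_build_fieldnames := by
  intro items _
  unfold Spec_build_fieldnames build_fieldnames build_fieldnames_alt
  set S : List String := PySem.Set.ofList (items.flatMap (fun it => PySem.Dict.keys ⟨it⟩)) with hS
  set keys : List String := PySem.List.sorted S (fun x => x) with hkeys
  have hpw : keys.Pairwise (· < ·) := hkeys ▸ PySem.List.sorted_ofList_pairwise_lt _
  have hnd : keys.Nodup := hpw.imp ne_of_lt
  have hmemk : ∀ a : String, a ∈ keys ↔ a ∈ S := fun a => PySem.List.mem_sorted S _ _ a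
  -- A's first two loops, as filters
  set P : List String := pvPreferred.filter (fun k => decide (k ∈ keys)) with hP
  set R : List String := keys.filter (fun k => decide (k ∉ P)) with hR
  show List.foldl (fun acc extra => if extra ∉ acc then acc ++ [extra] else acc)
      (List.foldl (fun acc k => if k ∉ acc then acc ++ [k] else acc)
        (List.foldl (fun acc k => if k ∈ keys then acc ++ [k] else acc) [] pvPreferred) keys)
      ["bairro", "link"]
    = List.foldl (fun acc extra => if extra ∉ acc then acc ++ [extra] else acc)
      (PySem.List.sorted2 S (fun k => PySem.Dict.getD pvPriority k (pvPreferred.length : Int)) (fun k => k))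
      ["bairro", "link"]
  congr 1
  rw [PySem.List.foldl_append_ite_eq_filter (fun k => k ∈ keys) pvPreferred []]
  rw [List.nil_append, pv_dedup_fold keys P hnd]
  -- B's sort equals P ++ R
  have hPsub : ∀ a ∈ P, a ∈ keys := fun a ha => by
    have := List.mem_filter.mp (hP ▸ ha); simpa using this.2
  have hRmem : ∀ a ∈ R, a ∈ keys ∧ a ∉ P := fun a ha => by
    have := List.mem_filter.mp (hR ▸ ha); exact ⟨this.1, by simpa using this.2⟩
  have hRnp : ∀ a ∈ R, a ∉ pvPreferred := by
    intro a ha hpref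
    exact (hRmem a ha).2 (List.mem_filter.mpr ⟨hpref, by simpa using (hRmem a ha).1⟩)
  have hnodupPR : (P ++ R).Nodup := by
    refine List.Nodup.append (pvPreferred_nodup.filter _) (hnd.filter _) ?_
    intro a haP haR
    exact (hRmem a haR).2 haP
  have hperm : (P ++ R).Perm S := by
    rw [List.perm_ext_iff_of_nodup hnodupPR (PySem.Set.nodup_ofList _)]
    intro a
    constructor
    · intro ha
      rcases List.mem_append.mp ha with h | h
      · exact (hmemk a).mp (hPsub a h)
      · exact (hmemk a).mp (hRmem a h).1
    · intro ha
      have hk : a ∈ keys := (hmemk a).mpr ha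
      by_cases hp : a ∈ P
      · exact List.mem_append.mpr (Or.inl hp)
      · exact List.mem_append.mpr (Or.inr (List.mem_filter.mpr ⟨hk, by simpa using hp⟩))
  have hpwPR : (P ++ R).Pairwise (fun a b => toLex (pvRank a, a) < toLex (pvRank b, b)) := by
    rw [List.pairwise_append]
    refine ⟨(pvRank_pairwise.filter _).imp_of_mem ?_, ?_, ?_⟩
    · intro a b _ _ hab
      exact Prod.Lex.toLex_lt_toLex.mpr (Or.inl hab)
    · refine (hpw.filter _).imp_of_mem ?_
      intro a b ha hb hab
      refine Prod.Lex.toLex_lt_toLex.mpr (Or.inr ⟨?_, hab⟩)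
      rw [pvRank_of_not_mem (hRnp a ha), pvRank_of_not_mem (hRnp b hb)]
    · intro a ha b hb
      refine Prod.Lex.toLex_lt_toLex.mpr (Or.inl ?_)
      rw [pvRank_of_not_mem (hRnp b hb)]
      exact pvRank_lt_of_mem a (List.mem_of_mem_filter (hP ▸ ha))
  rw [pv_sorted2_eq_sorted_lex S _ (fun k => k)]
  have : (fun k : String => toLex (PySem.Dict.getD pvPriority k (pvPreferred.length : Int), k))
       = (fun k : String => toLex (pvRank k, k)) := rfl
  rw [this, PySem.List.sorted_eq_of_perm_of_pairwise_lt S (P ++ R) _ hperm hpwPR]
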